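-- pv_equiv track=rewrite | github.com/COPOKA59/Python_2021-2022 | 2_Trim/Lab_2/2.1.py | Kyz
-- ===== SOURCE A (Python) =====
-- def Kyz(A, N, L):
--     A[0] = 1
--     A[1] = 1
--     for i in range(2, N + 1):
--         A[i] = A[i - 1]
--         j = 2
--         while j <= i and j <= L:
--             A[i] += A[i - j]
--             j += 1
--     return A
-- ===== SOURCE B (Python) =====
-- def Kyz(A, N, L):
--     # Mutates A in place like the original; each A[i] (2<=i<=N) becomes the
--     # sum of the previous min(i, max(L,1)) terms, maintained as a sliding-window
--     # running sum instead of re-summing up to L terms at every step.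
--     A[0] = 1
--     A[1] = 1
--     W = L if L > 1 else 1
--     s = A[1] + (A[0] if W > 1 else 0)
--     for i in range(2, N + 1):
--         A[i] = s
--         s += A[i]
--         if W <= i:
--             s -= A[i - W]
--     return A
-- ===== Notes on version B (the rewrite author's own statement) =====
-- stated objective: faster
-- what changed: Replaced A's inner while-loop that re-sums up to L previous terms at every position with a single sliding-window running sum that is updated in O(1) per step (add the new term, drop the one leaving the window).
import Mathlib
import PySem

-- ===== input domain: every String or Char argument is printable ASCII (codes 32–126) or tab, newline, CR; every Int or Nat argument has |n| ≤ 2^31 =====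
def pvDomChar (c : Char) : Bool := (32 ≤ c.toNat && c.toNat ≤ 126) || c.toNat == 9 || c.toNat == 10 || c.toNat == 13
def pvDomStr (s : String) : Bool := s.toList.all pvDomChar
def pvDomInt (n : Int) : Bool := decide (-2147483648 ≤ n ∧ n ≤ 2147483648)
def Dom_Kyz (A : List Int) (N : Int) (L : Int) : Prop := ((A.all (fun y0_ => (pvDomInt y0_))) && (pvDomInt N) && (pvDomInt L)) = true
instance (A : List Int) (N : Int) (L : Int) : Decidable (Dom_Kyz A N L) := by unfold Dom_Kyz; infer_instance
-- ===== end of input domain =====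

-- B replaces A's O(N*L) inner re-summation of up to L previous terms by an O(N)
-- sliding-window running sum updated incrementally each step.  Both the Python A
-- and the Python B mutate the list argument in place; the equivalence proved here
-- is about the RETURN value (which is that same list).

-- ===== PORT A =====
-- inner 'while j <= i and j <= L: A[i] += A[i-j]; j += 1'
def KyzWhile (arr : List Int) (i : Int) (L : Int) (j : Int) : List Int :=
  if h : j ≤ i ∧ j ≤ L then
    KyzWhile (PySem.List.pySetD arr i
        (PySem.List.pyGetD arr i 0 + PySem.List.pyGetD arr (i - j) 0)) i L (j + 1)
  else arr
termination_by (i + 1 - j).toNat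
decreasing_by omega

-- body of A's 'for i in range(2, N+1)' loop
def KyzStepA (L : Int) (arr : List Int) (i : Int) : List Int :=
  KyzWhile (PySem.List.pySetD arr i (PySem.List.pyGetD arr (i - 1) 0)) i L 2

def Kyz (A : List Int) (N : Int) (L : Int) : List Int :=
  -- A[0] = 1; A[1] = 1  (in range under Pre_Kyz; Python raises IndexError otherwise)
  let A1 := PySem.List.pySetD A 0 1
  let A2 := PySem.List.pySetD A1 1 1
  (PySem.List.pyRange 2 (N + 1)).foldl (KyzStepA L) A2

-- ===== PORT B =====
-- body of B's loop: write the running sum, then slide the window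
def KyzStepB (W : Int) (st : List Int × Int) (i : Int) : List Int × Int :=
  let arr := PySem.List.pySetD st.1 i st.2
  let s := st.2 + PySem.List.pyGetD arr i 0
  let s := if W ≤ i then s - PySem.List.pyGetD arr (i - W) 0 else s
  (arr, s)

def Kyz_alt (A : List Int) (N : Int) (L : Int) : List Int :=
  let A1 := PySem.List.pySetD A 0 1
  let A2 := PySem.List.pySetD A1 1 1
  let W := if 1 < L then L else 1
  let s0 := PySem.List.pyGetD A2 1 0 + (if 1 < W then PySem.List.pyGetD A2 0 0 else 0)
  ((PySem.List.pyRange 2 (N + 1)).foldl (KyzStepB W) (A2, s0)).1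

-- ===== PRECONDITION & SPEC =====
-- Exactly where Python's A returns: it writes A[0], A[1] and A[i] for 2 ≤ i ≤ N,
-- so it raises IndexError iff the list has fewer than 2 elements or N ≥ len(A).
def Pre_Kyz (A : List Int) (N : Int) (L : Int) : Prop :=
  2 ≤ A.length ∧ N < (A.length : Int)
instance (A : List Int) (N : Int) (L : Int) : Decidable (Pre_Kyz A N L) := by
  unfold Pre_Kyz; infer_instance

def pvWitness_Kyz : List Int × Int × Int := ([0, 0, 0, 0, 0, 0], 5, 3)

def Spec_Kyz (A : List Int) (N : Int) (L : Int) (out : List Int) : Prop := out = Kyz_alt A N L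
instance (A : List Int) (N : Int) (L : Int) (out : List Int) : Decidable (Spec_Kyz A N L out) := by
  unfold Spec_Kyz; infer_instance

-- ===== CLAIM (what is proved, stated in full; the proofs are below) =====
def Claim_equal_Kyz : Prop := ∀ (A : List Int) (N : Int) (L : Int), Dom_Kyz A N L → Pre_Kyz A N L → Spec_Kyz A N L (Kyz A N L)

-- ===== LEMMAS AND PROOFS =====

-- sum of pyGetD arr (i-k) 0 for k = j, j+1, …, m (empty when m < j)
def tailSum (arr : List Int) (i : Int) (j : Int) (m : Int) : Int :=
  if _h : j ≤ m then PySem.List.pyGetD arr (i - j) 0 + tailSum arr i (j + 1) m else 0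
termination_by (m + 1 - j).toNat
decreasing_by omega

lemma tailSum_nil (arr : List Int) (i j m : Int) (h : m < j) : tailSum arr i j m = 0 := by
  rw [tailSum]; simp [not_le.mpr h]

lemma tailSum_cons (arr : List Int) (i j m : Int) (h : j ≤ m) :
    tailSum arr i j m = PySem.List.pyGetD arr (i - j) 0 + tailSum arr i (j + 1) m := by
  rw [tailSum]; simp [h]

lemma tailSum_shift_aux (n : ℕ) : ∀ (arr : List Int) (i j m : Int), (m + 1 - j).toNat ≤ n →
    tailSum arr (i + 1) (j + 1) (m + 1) = tailSum arr i j m := by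
  induction n with
  | zero =>
    intro arr i j m hn
    rw [tailSum_nil arr (i+1) (j+1) (m+1) (by omega), tailSum_nil arr i j m (by omega)]
  | succ n ih =>
    intro arr i j m hn
    by_cases h : j ≤ m
    · rw [tailSum_cons arr (i+1) (j+1) (m+1) (by omega), tailSum_cons arr i j m h,
        show i + 1 - (j + 1) = i - j by ring, ih arr i (j+1) m (by omega)]
    · rw [tailSum_nil arr (i+1) (j+1) (m+1) (by omega), tailSum_nil arr i j m (by omega)]

lemma tailSum_shift (arr : List Int) (i j m : Int) :
    tailSum arr (i + 1) (j + 1) (m + 1) = tailSum arr i j m :=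
  tailSum_shift_aux (m + 1 - j).toNat arr i j m le_rfl

lemma tailSum_congr_aux (n : ℕ) : ∀ (arr' arr : List Int) (i j m : Int), (m + 1 - j).toNat ≤ n →
    (∀ k : Int, j ≤ k → k ≤ m → PySem.List.pyGetD arr' (i - k) 0 = PySem.List.pyGetD arr (i - k) 0) →
    tailSum arr' i j m = tailSum arr i j m := by
  induction n with
  | zero =>
    intro arr' arr i j m hn _
    rw [tailSum_nil arr' i j m (by omega), tailSum_nil arr i j m (by omega)]
  | succ n ih =>
    intro arr' arr i j m hn hk
    by_cases h : j ≤ m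
    · rw [tailSum_cons arr' i j m h, tailSum_cons arr i j m h,
        hk j le_rfl h, ih arr' arr i (j+1) m (by omega) (fun k h1 h2 => hk k (by omega) h2)]
    · rw [tailSum_nil arr' i j m (by omega), tailSum_nil arr i j m (by omega)]

lemma tailSum_congr (arr' arr : List Int) (i j m : Int)
    (hk : ∀ k : Int, j ≤ k → k ≤ m → PySem.List.pyGetD arr' (i - k) 0 = PySem.List.pyGetD arr (i - k) 0) :
    tailSum arr' i j m = tailSum arr i j m :=
  tailSum_congr_aux (m + 1 - j).toNat arr' arr i j m le_rfl hk

lemma tailSum_snoc_aux (n : ℕ) : ∀ (arr : List Int) (i j m : Int), (m + 1 - j).toNat ≤ n → j ≤ m →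
    tailSum arr i j m = tailSum arr i j (m - 1) + PySem.List.pyGetD arr (i - m) 0 := by
  induction n with
  | zero => intro arr i j m hn h; omega
  | succ n ih =>
    intro arr i j m hn h
    by_cases hjm : j = m
    · subst hjm
      rw [tailSum_cons arr i j j le_rfl, tailSum_nil arr i (j+1) j (by omega),
        tailSum_nil arr i j (j - 1) (by omega)]
      ring
    · rw [tailSum_cons arr i j m h, tailSum_cons arr i j (m-1) (by omega),
        ih arr i (j+1) m (by omega) (by omega)]
      ring

lemma tailSum_snoc (arr : List Int) (i j m : Int) (h : j ≤ m) :
    tailSum arr i j m = tailSum arr i j (m - 1) + PySem.List.pyGetD arr (i - m) 0 :=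
  tailSum_snoc_aux (m + 1 - j).toNat arr i j m le_rfl h

-- reading an untouched (smaller, nonnegative) index through a set at i
lemma pyGetD_set_lt (arr : List Int) (i : Int) (v : Int) (x : Int) (hx0 : 0 ≤ x) (hxi : x < i) :
    PySem.List.pyGetD (arr.set i.toNat v) x 0 = PySem.List.pyGetD arr x 0 := by
  rw [PySem.List.pyGetD_of_nonneg _ _ hx0, PySem.List.pyGetD_of_nonneg _ _ hx0,
    List.getD_eq_getElem?_getD, List.getD_eq_getElem?_getD,
    List.getElem?_set_ne (by omega)]

lemma KyzWhile_spec_aux (n : ℕ) : ∀ (arr : List Int) (i L j v : Int),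
    (i + 1 - j).toNat ≤ n → 2 ≤ j → 2 ≤ i → i.toNat < arr.length →
    KyzWhile (arr.set i.toNat v) i L j = arr.set i.toNat (v + tailSum arr i j (min i L)) := by
  induction n with
  | zero =>
    intro arr i L j v hn h2 hi hlen
    rw [KyzWhile, dif_neg (by omega), tailSum_nil arr i j (min i L) (by omega)]
    ring_nf
  | succ n ih =>
    intro arr i L j v hn h2 hi hlen
    by_cases h : j ≤ i ∧ j ≤ L
    · rw [KyzWhile, dif_pos h,
        PySem.List.pySetD_of_nonneg _ _ (by omega),
        PySem.List.pyGetD_of_nonneg _ _ (by omega : (0:Int) ≤ i),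
        List.getD_eq_getElem?_getD, List.getElem?_set_self hlen]
      simp only [Option.getD_some]
      rw [pyGetD_set_lt arr i v (i - j) (by omega) (by omega),
        List.set_set,
        ih arr i L (j+1) (v + PySem.List.pyGetD arr (i - j) 0) (by omega) (by omega) hi hlen,
        tailSum_cons arr i j (min i L) (by omega)]
      ring_nf
    · rw [KyzWhile, dif_neg h, tailSum_nil arr i j (min i L) (by omega)]
      ring_nf

-- value A writes at position i (before the window/L reconciliation)
lemma KyzStepA_spec (arr : List Int) (L i : Int) (hi : 2 ≤ i) (hlen : i.toNat < arr.length) :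
    KyzStepA L arr i =
      arr.set i.toNat (PySem.List.pyGetD arr (i - 1) 0 + tailSum arr i 2 (min i L)) := by
  rw [KyzStepA, PySem.List.pySetD_of_nonneg _ _ (by omega),
    KyzWhile_spec_aux (i + 1 - 2).toNat arr i L 2 _ le_rfl le_rfl hi hlen]

-- the running-sum value: sum of the last min(i, W) entries before position i
def Sval (arr : List Int) (i : Int) (W : Int) : Int :=
  PySem.List.pyGetD arr (i - 1) 0 + tailSum arr i 2 (min i W)

-- with W = max(L,1), the window sum is exactly what A computes
lemma tailSum_minL (arr : List Int) (i L : Int) (hi : 2 ≤ i) :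
    tailSum arr i 2 (min i L) = tailSum arr i 2 (min i (if 1 < L then L else 1)) := by
  by_cases h : 1 < L
  · simp [h]
  · rw [if_neg h, tailSum_nil arr i 2 (min i L) (by omega),
      tailSum_nil arr i 2 (min i 1) (by omega)]

-- one step of the sliding window
lemma Sval_step (arr : List Int) (i W : Int) (hi : 2 ≤ i) (hW : 1 ≤ W)
    (hlen : i.toNat < arr.length) :
    Sval (arr.set i.toNat (Sval arr i W)) (i + 1) W =
      Sval arr i W + Sval arr i W -
        (if W ≤ i then PySem.List.pyGetD arr (i - W) 0 else 0) := by
  have hget : PySem.List.pyGetD (arr.set i.toNat (Sval arr i W)) (i + 1 - 1) 0 = Sval arr i W := by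
    rw [show i + 1 - 1 = i by ring, PySem.List.pyGetD_of_nonneg _ _ (by omega : (0:Int) ≤ i),
      List.getD_eq_getElem?_getD, List.getElem?_set_self hlen]
    rfl
  by_cases hWi : W ≤ i
  · have hmin1 : min (i + 1) W = (W - 1) + 1 := by omega
    have hmin2 : min i W = W := by omega
    rw [Sval, hget, hmin1, show (2:Int) = 1 + 1 by ring, tailSum_shift,
      tailSum_congr (arr.set i.toNat (Sval arr i W)) arr i 1 (W - 1)
        (fun k h1 h2 => pyGetD_set_lt arr i _ (i - k) (by omega) (by omega))]
    by_cases hW1 : W = 1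
    · subst hW1
      rw [tailSum_nil arr i 1 (1 - 1) (by omega), Sval, hmin2,
        tailSum_nil arr i 2 1 (by omega), if_pos hWi]
      ring
    · rw [tailSum_cons arr i 1 (W - 1) (by omega), show (1:Int) + 1 = 2 by norm_num,
        Sval, hmin2, tailSum_snoc arr i 2 W (by omega), if_pos hWi]
      ring
  · have hmin1 : min (i + 1) W = (i - 1) + 1 + 1 := by omega
    have hmin2 : min i W = i := by omega
    rw [Sval, hget, hmin1, show (2:Int) = 1 + 1 by ring, tailSum_shift,
      tailSum_congr (arr.set i.toNat (Sval arr i W)) arr i 1 ((i-1)+1)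
        (fun k h1 h2 => pyGetD_set_lt arr i _ (i - k) (by omega) (by omega)),
      tailSum_cons arr i 1 ((i-1)+1) (by omega), show (1:Int) + 1 = 2 by norm_num,
      show (i : Int) - 1 + 1 = i by ring, Sval, hmin2, if_neg hWi]
    ring

-- main simulation invariant, from the right end of the range
lemma Kyz_loop (A2 : List Int) (L W s0 : Int)
    (hW : W = if 1 < L then L else 1)
    (hs0 : s0 = PySem.List.pyGetD A2 1 0 + (if 1 < W then PySem.List.pyGetD A2 0 0 else 0))
    (n : ℕ) :
    2 + (n : Int) ≤ (A2.length : Int) →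
      ((PySem.List.pyRange 2 (2 + (n : Int))).foldl (KyzStepB W) (A2, s0)).1 =
        (PySem.List.pyRange 2 (2 + (n : Int))).foldl (KyzStepA L) A2 ∧
      ((PySem.List.pyRange 2 (2 + (n : Int))).foldl (KyzStepB W) (A2, s0)).2 =
        Sval ((PySem.List.pyRange 2 (2 + (n : Int))).foldl (KyzStepA L) A2) (2 + (n : Int)) W ∧
      ((PySem.List.pyRange 2 (2 + (n : Int))).foldl (KyzStepA L) A2).length = A2.length := by
  have hW1 : 1 ≤ W := by rw [hW]; split <;> omega
  induction n with
  | zero =>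
    intro hlen
    simp only [Nat.cast_zero, add_zero, PySem.List.pyRange_one_eq_nil (le_refl (2 : Int)),
      List.foldl_nil]
    refine ⟨by trivial, ?_, by trivial⟩
    rw [hs0, Sval]
    by_cases h : 1 < W
    · rw [if_pos h, show min (2 : Int) W = 2 by omega,
        tailSum_cons A2 2 2 2 le_rfl, tailSum_nil A2 2 (2+1) 2 (by omega),
        show (2 : Int) - 1 = 1 by norm_num, show (2 : Int) - 2 = 0 by norm_num]
      ring_nf
    · rw [if_neg h, show min (2 : Int) W = 1 by omega, tailSum_nil A2 2 2 1 (by omega),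
        show (2 : Int) - 1 = 1 by norm_num]
  | succ n ih =>
    intro hlen
    have hcast : (2 : Int) + ((n + 1 : ℕ) : Int) = (2 + (n : Int)) + 1 := by push_cast; ring
    have hrange := PySem.List.pyRange_one_succ_right (a := 2) (b := 2 + (n : Int)) (by omega)
    obtain ⟨h1, h2, h3⟩ := ih (by push_cast at hlen ⊢; omega)
    set i : Int := 2 + (n : Int) with hi
    have hi2 : 2 ≤ i := by omega
    set GA := (PySem.List.pyRange 2 i).foldl (KyzStepA L) A2 with hGA
    have hilen : i.toNat < GA.length := by push_cast at hlen; omega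
    simp only [hcast, hrange, List.foldl_append, List.foldl_cons, List.foldl_nil, ← hGA]
    have hstepA : KyzStepA L GA i = GA.set i.toNat (Sval GA i W) := by
      rw [KyzStepA_spec GA L i hi2 hilen, Sval, tailSum_minL GA i L hi2, ← hW]
    have hB2 : (PySem.List.pyRange 2 i).foldl (KyzStepB W) (A2, s0) = (GA, Sval GA i W) := by
      rw [Prod.ext_iff]; exact ⟨h1, h2⟩
    rw [hB2]
    have harr : PySem.List.pySetD GA i (Sval GA i W) = GA.set i.toNat (Sval GA i W) :=
      PySem.List.pySetD_of_nonneg _ _ (by omega)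
    have hread : PySem.List.pyGetD (GA.set i.toNat (Sval GA i W)) i 0 = Sval GA i W := by
      rw [PySem.List.pyGetD_of_nonneg _ _ (by omega : (0 : Int) ≤ i),
        List.getD_eq_getElem?_getD, List.getElem?_set_self hilen]
      rfl
    refine ⟨by simp only [KyzStepB, harr, hstepA], ?_, by rw [hstepA]; simp [h3]⟩
    simp only [KyzStepB, harr, hread, hstepA]
    rw [Sval_step GA i W hi2 hW1 hilen]
    by_cases hWi : W ≤ i
    · rw [if_pos hWi, if_pos hWi, pyGetD_set_lt GA i _ (i - W) (by omega) (by omega)]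
    · rw [if_neg hWi, if_neg hWi]
      ring

-- ===== VERDICT (by name: the statement is the Claim_ definition above) =====
theorem Kyz_spec : Claim_equal_Kyz := by
  intro A N L _ hpre
  obtain ⟨hlen2, hNlen⟩ := hpre
  unfold Spec_Kyz Kyz Kyz_alt
  simp only []
  set A2 : List Int := PySem.List.pySetD (PySem.List.pySetD A 0 1) 1 1 with hA2
  have hA2len : A2.length = A.length := by
    rw [hA2, PySem.List.length_pySetD, PySem.List.length_pySetD]
  by_cases hN : N + 1 ≤ 2
  · rw [PySem.List.pyRange_one_eq_nil hN]
    rfl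
  · have hn : N + 1 = 2 + ((N - 1).toNat : Int) := by omega
    obtain ⟨h1, _, _⟩ := Kyz_loop A2 L (if 1 < L then L else 1)
      (PySem.List.pyGetD A2 1 0 + (if 1 < (if 1 < L then L else 1) then PySem.List.pyGetD A2 0 0 else 0))
      rfl rfl (N - 1).toNat (by rw [hA2len]; omega)
    rw [hn, h1]
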